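-- pv_equiv track=rewrite | github.com/cmd-prompt/SubmarineCableGraph | analyze_cuts.py | internalcutNodes
-- ===== SOURCE A (Python) =====
-- from collections import defaultdict
--
-- def internalcutNodes(targetCountry, dbData):
--     cableToCountries = defaultdict(set)
--     for cable, lp, country in dbData:
--         cableToCountries[cable].add(country)
--
--     internationalCables = {c for c, countries in cableToCountries.items() if len(countries) > 1}
--
--     internalCutSet = set()
--     for cable, lp, country in dbData:
--         if country == targetCountry and cable in internationalCables:
--             internalCutSet.add(lp)
--
--     return sorted(list(internalCutSet))
-- ===== SOURCE B (Python) =====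
-- def internalcutNodes(targetCountry, dbData):
--     # Brute force, no grouping index: a row's cable is international exactly when
--     # some row of the same cable carries a different country; for rows whose
--     # country is targetCountry that is equivalent to "some row of this cable has
--     # a country other than targetCountry".
--     return sorted({lp for cable, lp, country in dbData
--                    if country == targetCountry
--                    and any(c == cable and ctry != targetCountry
--                            for c, _, ctry in dbData)})
-- ===== Notes on version B (the rewrite author's own statement) =====
-- stated objective: simpler
-- what changed: B drops A's dict-of-sets grouping entirely: a single comprehension keeps a landing point when its row's country is targetCountry and a nested any-scan finds a row of the same cable with a different country (equivalent to A's distinct-country count > 1 because the target row itself supplies targetCountry).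
import Mathlib
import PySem

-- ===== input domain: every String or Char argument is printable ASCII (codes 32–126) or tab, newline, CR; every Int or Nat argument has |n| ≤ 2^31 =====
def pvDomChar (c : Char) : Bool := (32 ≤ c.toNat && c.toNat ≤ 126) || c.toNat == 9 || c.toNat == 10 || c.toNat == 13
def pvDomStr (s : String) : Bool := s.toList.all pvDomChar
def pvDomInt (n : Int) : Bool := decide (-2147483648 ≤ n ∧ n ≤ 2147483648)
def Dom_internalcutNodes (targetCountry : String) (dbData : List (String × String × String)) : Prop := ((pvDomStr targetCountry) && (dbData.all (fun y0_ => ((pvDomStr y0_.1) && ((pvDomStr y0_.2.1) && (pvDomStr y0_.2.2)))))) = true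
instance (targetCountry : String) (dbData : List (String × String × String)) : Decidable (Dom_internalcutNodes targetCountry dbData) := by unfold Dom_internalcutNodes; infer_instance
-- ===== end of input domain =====

-- B drops A's dict-of-sets grouping: one comprehension with a nested any-scan for
-- "same cable, different country"; objective: simpler (shorter, no index), not faster.

-- ===== PORT A =====
def internalcutNodes (targetCountry : String) (dbData : List (String × String × String)) : List String :=
  let cableToCountries : PySem.Dict String (PySem.Set String) :=
    dbData.foldl (fun d t => d.insert t.1 (PySem.Set.add (d.getD t.1 PySem.Set.empty) t.2.2)) PySem.Dict.empty
  let internationalCables : PySem.Set String :=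
    cableToCountries.items.foldl
      (fun s p => if 1 < PySem.Set.len p.2 then PySem.Set.add s p.1 else s) PySem.Set.empty
  let internalCutSet : PySem.Set String :=
    dbData.foldl
      (fun s t => if t.2.2 = targetCountry ∧ PySem.Set.contains internationalCables t.1
                  then PySem.Set.add s t.2.1 else s) PySem.Set.empty
  PySem.List.sorted internalCutSet (fun x => x) false

-- ===== PORT B =====
def internalcutNodes_alt (targetCountry : String) (dbData : List (String × String × String)) : List String :=
  PySem.List.sorted
    (PySem.Set.ofList
      ((dbData.filter (fun t =>
          t.2.2 == targetCountry
            && dbData.any (fun u => u.1 == t.1 && !(u.2.2 == targetCountry)))).map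
        (fun t => t.2.1)))
    (fun x => x) false

-- ===== PRECONDITION & SPEC =====
def Spec_internalcutNodes (targetCountry : String) (dbData : List (String × String × String)) (out : List String) : Prop := out = internalcutNodes_alt targetCountry dbData
instance (targetCountry : String) (dbData : List (String × String × String)) (out : List String) : Decidable (Spec_internalcutNodes targetCountry dbData out) := by unfold Spec_internalcutNodes; infer_instance

-- ===== CLAIM =====
def Claim_equal_internalcutNodes : Prop := ∀ (targetCountry : String) (dbData : List (String × String × String)), Dom_internalcutNodes targetCountry dbData → Spec_internalcutNodes targetCountry dbData (internalcutNodes targetCountry dbData)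

-- ===== LEMMAS AND PROOFS =====

-- countries recorded for cable c, in dbData order
def pvCntL (c : String) (db : List (String × String × String)) : List String :=
  (db.filter (fun t => t.1 == c)).map (fun t => t.2.2)

-- A's dict build, characterised
theorem pvDictA (db : List (String × String × String))
    (d : PySem.Dict String (PySem.Set String)) (c : String) :
    (db.foldl (fun d t => d.insert t.1 (PySem.Set.add (d.getD t.1 PySem.Set.empty) t.2.2)) d).getD c PySem.Set.empty
      = PySem.Set.update (d.getD c PySem.Set.empty) (pvCntL c db) := by
  induction db generalizing d with
  | nil => simp [pvCntL, PySem.Set.update]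
  | cons t rest ih =>
    simp only [List.foldl_cons, ih, pvCntL, List.filter_cons]
    by_cases h : t.1 = c
    · subst h
      simp [PySem.Set.update_cons]
    · simp [PySem.Dict.getD_insert, h, Ne.symm h]

-- generic: membership in a conditional Set.add fold
theorem pvMemFoldAdd {β : Type} (l : List β) (P : β → Prop) [DecidablePred P]
    (k : β → String) (s0 : PySem.Set String) (x : String) :
    (x ∈ l.foldl (fun s p => if P p then PySem.Set.add s (k p) else s) s0)
      ↔ x ∈ s0 ∨ ∃ p ∈ l, P p ∧ x = k p := by
  induction l generalizing s0 with
  | nil => simp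
  | cons a l ih =>
    by_cases h : P a
    · simp [h, ih, PySem.Set.mem_add]; tauto
    · simp [h, ih]

-- generic: a conditional Set.add fold preserves Nodup
theorem pvNodupFoldAdd {β : Type} (l : List β) (P : β → Prop) [DecidablePred P]
    (k : β → String) (s0 : PySem.Set String) (h0 : s0.Nodup) :
    (l.foldl (fun s p => if P p then PySem.Set.add s (k p) else s) s0).Nodup := by
  induction l generalizing s0 with
  | nil => exact h0
  | cons a l ih =>
    by_cases h : P a
    · simp only [List.foldl_cons, h, if_pos]
      exact ih _ (PySem.Set.nodup_add _ _ h0)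
    · simp only [List.foldl_cons, h, if_neg, not_false_iff]
      exact ih _ h0

-- A's result set, characterised by membership
theorem pvMemA (tc : String) (db : List (String × String × String)) (x : String) :
    (x ∈ (db.foldl
      (fun s t => if t.2.2 = tc ∧ PySem.Set.contains
            ((db.foldl (fun d t => d.insert t.1 (PySem.Set.add (d.getD t.1 PySem.Set.empty) t.2.2)) PySem.Dict.empty).items.foldl
              (fun s p => if 1 < PySem.Set.len p.2 then PySem.Set.add s p.1 else s) PySem.Set.empty) t.1
          then PySem.Set.add s t.2.1 else s) PySem.Set.empty))
    ↔ ∃ t ∈ db, t.2.2 = tc ∧ 1 < PySem.Set.len (PySem.Set.ofList (pvCntL t.1 db)) ∧ x = t.2.1 := by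
  have hnd : ((db.foldl (fun d t => d.insert t.1 (PySem.Set.add (d.getD t.1 PySem.Set.empty) t.2.2)) PySem.Dict.empty)).keys.Nodup :=
    PySem.Dict.nodup_keys_foldl_insert_key db (fun t => t.1) _ _ PySem.Dict.nodup_keys_empty
  have hitems : ((db.foldl (fun d t => d.insert t.1 (PySem.Set.add (d.getD t.1 PySem.Set.empty) t.2.2)) PySem.Dict.empty)).items
      = ((db.foldl (fun d t => d.insert t.1 (PySem.Set.add (d.getD t.1 PySem.Set.empty) t.2.2)) PySem.Dict.empty)).keys.map
          (fun k => (k, PySem.Set.ofList (pvCntL k db))) := by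
    rw [PySem.Dict.items_eq_map_keys _ hnd PySem.Set.empty]
    refine List.map_congr_left (fun k _ => ?_)
    rw [pvDictA]
    simp [PySem.Set.update_nil_left, PySem.Set.empty]
  have hkeys : ((db.foldl (fun d t => d.insert t.1 (PySem.Set.add (d.getD t.1 PySem.Set.empty) t.2.2)) PySem.Dict.empty)).keys
      = PySem.Set.ofList (db.map (fun t => t.1)) := by
    rw [PySem.Dict.keys_foldl_insert_key]
    simp [PySem.Set.update_nil_left]
  simp only [PySem.Set.empty] at hnd hitems hkeys
  rw [pvMemFoldAdd]
  simp only [PySem.Set.empty, List.not_mem_nil, false_or]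
  constructor
  · rintro ⟨t, ht, ⟨htc, hc⟩, hx⟩
    refine ⟨t, ht, htc, ?_, hx⟩
    have := (PySem.Set.contains_iff _ _).mp hc
    rw [pvMemFoldAdd] at this
    rcases this with h | ⟨p, hp, hlen, hpe⟩
    · simp at h
    · rw [hitems] at hp
      rcases List.mem_map.mp hp with ⟨k, _, rfl⟩
      simpa [hpe] using hlen
  · rintro ⟨t, ht, htc, hlen, hx⟩
    refine ⟨t, ht, ⟨htc, ?_⟩, hx⟩
    refine (PySem.Set.contains_iff _ _).mpr ?_
    rw [pvMemFoldAdd]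
    refine Or.inr ⟨(t.1, PySem.Set.ofList (pvCntL t.1 db)), ?_, hlen, rfl⟩
    rw [hitems]
    refine List.mem_map.mpr ⟨t.1, ?_, rfl⟩
    rw [hkeys]
    exact (PySem.Set.mem_ofList _ _).mpr (List.mem_map.mpr ⟨t, ht, rfl⟩)

-- two distinct members force length > 1
theorem pvOneLtLen {l : List String} {x y : String}
    (hx : x ∈ l) (hy : y ∈ l) (hxy : x ≠ y) : 1 < l.length := by
  match l with
  | [] => simp at hx
  | [a] =>
    simp at hx hy
    exact absurd (hx.trans hy.symm) hxy
  | a :: b :: rest => simp [Nat.lt_of_lt_of_le]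

-- a nodup list whose members are all x has length ≤ 1
theorem pvLenLeOne {l : List String} {x : String}
    (hnd : l.Nodup) (hall : ∀ y ∈ l, y = x) : l.length ≤ 1 := by
  match l with
  | [] => simp
  | [a] => simp
  | a :: b :: rest =>
    have ha : a = x := hall a (by simp)
    have hb : b = x := hall b (by simp)
    rw [List.nodup_cons] at hnd
    exact absurd (ha.trans hb.symm) (fun h => hnd.1 (by simp [h]))

-- the key bridge: for a row with country tc, "more than one distinct country on
-- this cable" is exactly "some row of this cable has a country other than tc"
theorem pvBridge (tc : String) (db : List (String × String × String))
    (t : String × String × String) (ht : t ∈ db) (htc : t.2.2 = tc) :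
    1 < PySem.Set.len (PySem.Set.ofList (pvCntL t.1 db))
      ↔ ∃ u ∈ db, u.1 = t.1 ∧ u.2.2 ≠ tc := by
  have htcmem : tc ∈ PySem.Set.ofList (pvCntL t.1 db) := by
    refine (PySem.Set.mem_ofList _ _).mpr ?_
    exact List.mem_map.mpr ⟨t, List.mem_filter.mpr ⟨ht, by simp⟩, htc⟩
  have hc : (1 < PySem.Set.len (PySem.Set.ofList (pvCntL t.1 db)))
      ↔ 1 < (PySem.Set.ofList (pvCntL t.1 db)).length := by
    simp [PySem.Set.len]
  rw [hc]
  constructor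
  · intro hlen
    by_contra hno
    push_neg at hno
    have hall : ∀ y ∈ PySem.Set.ofList (pvCntL t.1 db), y = tc := by
      intro y hy
      have := (PySem.Set.mem_ofList _ _).mp hy
      rcases List.mem_map.mp this with ⟨u, huf, rfl⟩
      rcases List.mem_filter.mp huf with ⟨hu, hcond⟩
      exact hno u hu (eq_of_beq hcond)
    exact absurd hlen (not_lt.mpr (pvLenLeOne (PySem.Set.nodup_ofList _) hall))
  · rintro ⟨u, hu, huc, hune⟩
    have humem : u.2.2 ∈ PySem.Set.ofList (pvCntL t.1 db) := by
      refine (PySem.Set.mem_ofList _ _).mpr ?_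
      exact List.mem_map.mpr ⟨u, List.mem_filter.mpr ⟨hu, by simp [huc]⟩, rfl⟩
    exact pvOneLtLen humem htcmem hune

-- B's result set, characterised by membership
theorem pvMemB (tc : String) (db : List (String × String × String)) (x : String) :
    (x ∈ PySem.Set.ofList
      ((db.filter (fun t => t.2.2 == tc && db.any (fun u => u.1 == t.1 && !(u.2.2 == tc)))).map
        (fun t => t.2.1)))
    ↔ ∃ t ∈ db, t.2.2 = tc ∧ (∃ u ∈ db, u.1 = t.1 ∧ u.2.2 ≠ tc) ∧ x = t.2.1 := by
  rw [PySem.Set.mem_ofList]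
  simp only [List.mem_map, List.mem_filter, Bool.and_eq_true, beq_iff_eq,
    List.any_eq_true, Bool.not_eq_true', beq_eq_false_iff_ne]
  constructor
  · rintro ⟨t, ⟨ht, htc, u, hu, huc, hune⟩, rfl⟩
    exact ⟨t, ht, htc, ⟨u, hu, huc, hune⟩, rfl⟩
  · rintro ⟨t, ht, htc, ⟨u, hu, huc, hune⟩, rfl⟩
    exact ⟨t, ⟨ht, htc, u, hu, huc, hune⟩, rfl⟩

-- ===== VERDICT =====
theorem internalcutNodes_spec : Claim_equal_internalcutNodes := by
  intro tc db _
  unfold Spec_internalcutNodes internalcutNodes internalcutNodes_alt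
  refine PySem.List.sorted_eq_sorted_of_perm _ _ _ (fun a b h => h) ?_
  refine (List.perm_ext_iff_of_nodup ?_ (PySem.Set.nodup_ofList _)).mpr ?_
  · exact pvNodupFoldAdd _ _ _ _ List.nodup_nil
  · intro x
    rw [pvMemA tc db x, pvMemB tc db x]
    constructor
    · rintro ⟨t, ht, htc, hlen, hx⟩
      exact ⟨t, ht, htc, (pvBridge tc db t ht htc).mp hlen, hx⟩
    · rintro ⟨t, ht, htc, hex, hx⟩
      exact ⟨t, ht, htc, (pvBridge tc db t ht htc).mpr hex, hx⟩
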